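-- pv_equiv track=rewrite | github.com/victortoma15/toma-victor-stefan-Python | Laborator2/ex4.py | beethoven
-- ===== SOURCE A (Python) =====
-- def beethoven(notes, moves, start):
--     start = int(start) % len(notes)
--
--     final_song = []
--
--     for index in moves:
--         index = int(index)
--         start = (start + index) % len(notes)
--         final_song.append(notes[start])
--
--     return final_song
-- ===== SOURCE B (Python) =====
-- def beethoven(notes, moves, start):
--     n = len(notes)
--     total = int(start) % n          # raises ZeroDivisionError early when there are no notes, like A
--     for m in moves:
--         total += int(m)
--     # walk the moves backwards: total is the last cumulative index, subtract to recover earlier ones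
--     out = []
--     for m in reversed(moves):
--         out.append(notes[total % n])
--         total -= int(m)
--     out.reverse()
--     return out
-- ===== Notes on version B (the rewrite author's own statement) =====
-- stated objective: alternative
-- what changed: B first totals all moves into the final cumulative index, then traverses the moves in reverse, picking notes back-to-front while subtracting each move, and reverses the built list at the end, instead of A's forward loop that re-mods a stepped index each iteration; Pre_ excludes empty notes, on which both raise ZeroDivisionError.
import Mathlib
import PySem

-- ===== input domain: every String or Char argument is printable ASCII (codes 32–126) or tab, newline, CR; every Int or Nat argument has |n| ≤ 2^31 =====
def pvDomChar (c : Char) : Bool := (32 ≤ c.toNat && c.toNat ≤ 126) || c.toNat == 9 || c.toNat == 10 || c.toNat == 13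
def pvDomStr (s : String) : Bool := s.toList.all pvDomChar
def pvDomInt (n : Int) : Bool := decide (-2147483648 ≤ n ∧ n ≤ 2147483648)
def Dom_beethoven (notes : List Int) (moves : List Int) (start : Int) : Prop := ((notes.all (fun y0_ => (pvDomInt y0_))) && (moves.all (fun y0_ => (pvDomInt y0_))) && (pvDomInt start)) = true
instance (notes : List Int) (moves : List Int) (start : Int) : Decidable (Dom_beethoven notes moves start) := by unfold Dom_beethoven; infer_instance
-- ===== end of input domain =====

-- B totals the moves first, then walks them in reverse, picking notes back-to-front by subtraction and reversing at the end (alternative traversal; return value only).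
-- ===== PORT A =====
def beethoven (notes : List Int) (moves : List Int) (start : Int) : List Int :=
  let n : Int := notes.length
  -- start = int(start) % len(notes); then forward loop appending notes[start]
  (moves.foldl
    (fun (st : Int × List Int) index =>
      let start' := PySem.Int.mod (st.1 + index) n
      -- notes[start']: start' is in range, pyGetD exact here
      (start', st.2 ++ [PySem.List.pyGetD notes start' 0]))
    (PySem.Int.mod start n, [])).2

-- ===== PORT B =====
def beethoven_alt (notes : List Int) (moves : List Int) (start : Int) : List Int :=
  let n : Int := notes.length
  -- total = start % n; for m in moves: total += m
  let total := moves.foldl (fun t m => t + m) (PySem.Int.mod start n)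
  -- for m in reversed(moves): out.append(notes[total % n]); total -= m
  let st := moves.reverse.foldl
    (fun (st : List Int × Int) m =>
      (st.1 ++ [PySem.List.pyGetD notes (PySem.Int.mod st.2 n) 0], st.2 - m))
    ([], total)
  -- out.reverse()
  st.1.reverse

-- ===== PRECONDITION & SPEC =====
-- Pre_ excludes empty notes, on which Python A raises ZeroDivisionError at 'int(start) % len(notes)'.
def Pre_beethoven (notes : List Int) (moves : List Int) (start : Int) : Prop := notes ≠ []
instance (notes : List Int) (moves : List Int) (start : Int) : Decidable (Pre_beethoven notes moves start) := by unfold Pre_beethoven; infer_instance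
def pvWitness_beethoven : List Int × List Int × Int := ([5, 6, 7], [1, -4, 10], 2)
def Spec_beethoven (notes : List Int) (moves : List Int) (start : Int) (out : List Int) : Prop := out = beethoven_alt notes moves start
instance (notes : List Int) (moves : List Int) (start : Int) (out : List Int) : Decidable (Spec_beethoven notes moves start out) := by unfold Spec_beethoven; infer_instance

-- ===== CLAIM (what is proved, stated in full; the proofs are below) =====
def Claim_equal_beethoven : Prop := ∀ (notes : List Int) (moves : List Int) (start : Int), Dom_beethoven notes moves start → Pre_beethoven notes moves start → Spec_beethoven notes moves start (beethoven notes moves start)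

-- ===== LEMMAS AND PROOFS =====

-- raw cumulative sums s+m1, s+m1+m2, …
def prefSums (s : Int) : List Int → List Int
  | [] => []
  | m :: ms => (s + m) :: prefSums (s + m) ms

-- descending sums t, t-r1, t-r1-r2, …  (one per element of the list)
def descSums (t : Int) : List Int → List Int
  | [] => []
  | r :: rs => t :: descSums (t - r) rs

theorem mod_mod_add (s m n : Int) (hn : 0 < n) :
    PySem.Int.mod (PySem.Int.mod s n + m) n = PySem.Int.mod (s + m) n := by
  rw [PySem.Int.mod_eq_emod_of_pos hn, PySem.Int.mod_eq_emod_of_pos hn,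
      PySem.Int.mod_eq_emod_of_pos hn, Int.emod_add_emod]

theorem foldA (notes : List Int) (n : Int) (hn : 0 < n) :
    ∀ (ms : List Int) (s : Int) (acc : List Int),
      (ms.foldl
        (fun (st : Int × List Int) index =>
          let start' := PySem.Int.mod (st.1 + index) n
          (start', st.2 ++ [PySem.List.pyGetD notes start' 0]))
        (PySem.Int.mod s n, acc)).2
      = acc ++ (prefSums s ms).map (fun c => PySem.List.pyGetD notes (PySem.Int.mod c n) 0) := by
  intro ms
  induction ms with
  | nil => intro s acc; simp [prefSums]
  | cons m ms ih =>
    intro s acc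
    simp only [List.foldl_cons, prefSums, List.map_cons]
    rw [mod_mod_add s m n hn, ih (s + m)]
    simp

theorem descSums_append (m : Int) :
    ∀ (xs : List Int) (t : Int), descSums t (xs ++ [m]) = descSums t xs ++ [t - xs.sum] := by
  intro xs
  induction xs with
  | nil => intro t; simp [descSums]
  | cons x xs ih =>
    intro t
    simp only [List.cons_append, descSums, ih (t - x), List.sum_cons]
    congr 2
    ring

theorem prefSums_reverse :
    ∀ (ms : List Int) (s : Int), (prefSums s ms).reverse = descSums (s + ms.sum) ms.reverse := by
  intro ms
  induction ms with
  | nil => intro s; simp [prefSums, descSums]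
  | cons m ms ih =>
    intro s
    simp only [prefSums, List.reverse_cons, ih (s + m), List.sum_cons]
    rw [descSums_append]
    congr 2
    · ring_nf
    · simp [List.sum_reverse]; ring

theorem foldB (notes : List Int) (n : Int) :
    ∀ (rs : List Int) (t : Int) (acc : List Int),
      (rs.foldl
        (fun (st : List Int × Int) m =>
          (st.1 ++ [PySem.List.pyGetD notes (PySem.Int.mod st.2 n) 0], st.2 - m))
        (acc, t)).1
      = acc ++ (descSums t rs).map (fun c => PySem.List.pyGetD notes (PySem.Int.mod c n) 0) := by
  intro rs
  induction rs with
  | nil => intro t acc; simp [descSums]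
  | cons r rs ih =>
    intro t acc
    simp only [List.foldl_cons, descSums, List.map_cons]
    rw [ih (t - r)]
    simp

theorem prefSums_mod_congr (notes : List Int) (n : Int) (hn : 0 < n) :
    ∀ (ms : List Int) (s1 s2 : Int), PySem.Int.mod s1 n = PySem.Int.mod s2 n →
      (prefSums s1 ms).map (fun c => PySem.List.pyGetD notes (PySem.Int.mod c n) 0)
        = (prefSums s2 ms).map (fun c => PySem.List.pyGetD notes (PySem.Int.mod c n) 0) := by
  intro ms
  induction ms with
  | nil => intro s1 s2 _; rfl
  | cons m ms ih =>
    intro s1 s2 h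
    have hhead : PySem.Int.mod (s1 + m) n = PySem.Int.mod (s2 + m) n := by
      rw [← mod_mod_add s1 m n hn, h, mod_mod_add s2 m n hn]
    simp only [prefSums, List.map_cons, hhead, ih (s1 + m) (s2 + m) hhead]

-- foldl (+) expressed as a sum, to identify B's total with s + ms.sum
theorem foldl_add_sum : ∀ (ms : List Int) (s : Int), ms.foldl (fun t m => t + m) s = s + ms.sum := by
  intro ms
  induction ms with
  | nil => intro s; simp
  | cons m ms ih => intro s; simp only [List.foldl_cons, ih (s + m), List.sum_cons]; ring

-- ===== VERDICT (by name: the statement is the Claim_ definition above) =====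
theorem beethoven_spec : Claim_equal_beethoven := by
  intro notes moves start _ hpre
  unfold Spec_beethoven
  simp only [beethoven, beethoven_alt]
  have hn : 0 < (notes.length : Int) := by
    have : 0 < notes.length := List.length_pos_of_ne_nil hpre
    exact_mod_cast this
  rw [foldA notes _ hn moves start []]
  rw [foldl_add_sum, foldB notes _ moves.reverse _ []]
  simp only [List.nil_append]
  rw [← prefSums_reverse moves (PySem.Int.mod start (notes.length : Int)), ← List.map_reverse,
      List.reverse_reverse]
  exact (prefSums_mod_congr notes _ hn moves _ start (by
    have := mod_mod_add start 0 (notes.length : Int) hn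
    simpa using this)).symm
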